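-- pv_equiv track=rewrite | github.com/EESI/FDSL_Evo | fragmentation_pipeline/extractSmile_RelA_3F4M.py | getFragToRes
-- ===== SOURCE A (Python) =====
-- def getFragToRes(ligToProDict,ResToProDict,subStructureMatches,interactingLigands):
--     '''
--     To get the mapping from fragments to the sub structures
--     input;  the Ligand Atom to Protein Atom Dictionary
--
--             the Residue to Protein Dictionary
--
--             the SubSutrcture Matches dictionary
--     output: the dictionary mapping fragments to the Residues
--     '''
--     theDict={}
--     for fragment in interactingLigands:
--         theSet=subStructureMatches[fragment]
--         proSet=set()
--         for ele in theSet: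
--             if ele in ligToProDict:
--                 proSet=proSet.union(ligToProDict[ele])
--         ResSet=set()
--
--         for ele2 in proSet:
--             if ele2 in ResToProDict:
--                 ResSet=ResSet.union(ResToProDict[ele2])
--         theDict[fragment] = ResSet
--     return theDict
-- ===== SOURCE B (Python) =====
-- def getFragToRes(ligToProDict, ResToProDict, subStructureMatches, interactingLigands):
--     # Precompute, in one pass over ligToProDict, each ligand atom's residue set,
--     # so every fragment needs only one union pass over its atoms.
--     atomToRes = {}
--     for atom, proAtoms in ligToProDict.items():
--         resSet = set()
--         for p in proAtoms:
--             if p in ResToProDict: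
--                 resSet.update(ResToProDict[p])
--         atomToRes[atom] = resSet
--     theDict = {}
--     for fragment in interactingLigands:
--         ResSet = set()
--         for atom in subStructureMatches[fragment]:
--             if atom in atomToRes:
--                 ResSet.update(atomToRes[atom])
--         theDict[fragment] = ResSet
--     return theDict
-- ===== Notes on version B (the rewrite author's own statement) =====
-- stated objective: alternative
-- what changed: B precomputes in one pass over ligToProDict an atom-to-residue-set index (composing ligToProDict with ResToProDict), so each fragment is resolved by a single union pass over its substructure atoms instead of A's per-fragment two-stage re-derivation through an intermediate protein-atom set.
import Mathlib
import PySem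

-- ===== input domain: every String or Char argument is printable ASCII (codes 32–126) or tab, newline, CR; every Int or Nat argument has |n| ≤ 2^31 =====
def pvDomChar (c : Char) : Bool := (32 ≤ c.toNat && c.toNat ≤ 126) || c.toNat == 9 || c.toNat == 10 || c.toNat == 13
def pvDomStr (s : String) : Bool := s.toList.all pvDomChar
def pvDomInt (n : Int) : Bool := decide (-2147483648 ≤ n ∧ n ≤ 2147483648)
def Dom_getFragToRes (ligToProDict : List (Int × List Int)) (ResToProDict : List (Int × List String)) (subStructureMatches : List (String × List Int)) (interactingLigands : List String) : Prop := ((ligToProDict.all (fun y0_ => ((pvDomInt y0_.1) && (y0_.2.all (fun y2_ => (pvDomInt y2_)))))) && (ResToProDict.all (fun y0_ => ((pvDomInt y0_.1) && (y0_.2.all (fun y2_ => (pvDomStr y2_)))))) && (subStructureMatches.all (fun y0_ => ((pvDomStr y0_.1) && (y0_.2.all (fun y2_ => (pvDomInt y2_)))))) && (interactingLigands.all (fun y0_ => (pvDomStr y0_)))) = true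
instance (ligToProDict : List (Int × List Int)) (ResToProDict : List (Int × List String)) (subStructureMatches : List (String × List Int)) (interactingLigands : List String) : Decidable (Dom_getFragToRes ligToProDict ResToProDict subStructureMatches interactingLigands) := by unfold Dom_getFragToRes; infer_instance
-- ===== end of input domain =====

-- B precomputes a ligand-atom → residue-set index in one pass over ligToProDict, replacing A's
-- per-fragment re-derivation of protein atoms (objective: alternative decomposition; dict values
-- are Python sets, so only their set value — not hash order — is observable).

-- ===== PORT A =====
def getFragToRes (ligToProDict : List (Int × List Int)) (ResToProDict : List (Int × List String)) (subStructureMatches : List (String × List Int)) (interactingLigands : List String) : List (String × List String) :=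
  let ligD := PySem.Dict.ofList ligToProDict
  let resD := PySem.Dict.ofList ResToProDict
  let subD := PySem.Dict.ofList subStructureMatches
  (interactingLigands.foldl (fun theDict fragment =>
      let theSet := subD.getD fragment []   -- Python raises KeyError when fragment is absent: excluded by Pre_
      let proSet := theSet.foldl (fun proSet ele =>
          if ligD.contains ele then PySem.Set.union proSet (ligD.getD ele []) else proSet) PySem.Set.empty
      let ResSet := proSet.foldl (fun ResSet ele2 =>
          if resD.contains ele2 then PySem.Set.union ResSet (resD.getD ele2 []) else ResSet) PySem.Set.empty
      theDict.insert fragment ResSet) PySem.Dict.empty).items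

-- ===== PORT B =====
def getFragToRes_alt (ligToProDict : List (Int × List Int)) (ResToProDict : List (Int × List String)) (subStructureMatches : List (String × List Int)) (interactingLigands : List String) : List (String × List String) :=
  let resD := PySem.Dict.ofList ResToProDict
  let atomToRes := (PySem.Dict.ofList ligToProDict).items.foldl (fun d p =>
      let resSet := p.2.foldl (fun s q =>
          if resD.contains q then PySem.Set.update s (resD.getD q []) else s) PySem.Set.empty
      d.insert p.1 resSet) PySem.Dict.empty
  let subD := PySem.Dict.ofList subStructureMatches
  (interactingLigands.foldl (fun theDict fragment =>
      let ResSet := (subD.getD fragment []).foldl (fun s atom =>   -- KeyError when fragment absent: excluded by Pre_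
          if atomToRes.contains atom then PySem.Set.update s (atomToRes.getD atom []) else s) PySem.Set.empty
      theDict.insert fragment ResSet) PySem.Dict.empty).items

-- ===== PRECONDITION & SPEC =====
-- Pre_ excludes exactly the inputs where Python A raises KeyError: a fragment of
-- interactingLigands that is not a key of subStructureMatches.
def Pre_getFragToRes (ligToProDict : List (Int × List Int)) (ResToProDict : List (Int × List String)) (subStructureMatches : List (String × List Int)) (interactingLigands : List String) : Prop :=
  ∀ f ∈ interactingLigands, (PySem.Dict.ofList subStructureMatches).contains f = true
instance (ligToProDict : List (Int × List Int)) (ResToProDict : List (Int × List String)) (subStructureMatches : List (String × List Int)) (interactingLigands : List String) : Decidable (Pre_getFragToRes ligToProDict ResToProDict subStructureMatches interactingLigands) := by unfold Pre_getFragToRes; infer_instance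
def pvWitness_getFragToRes : (List (Int × List Int)) × (List (Int × List String)) × (List (String × List Int)) × List String :=
  ([(1, [10, 11]), (2, [11])], [(10, ["ARG5"]), (11, ["LYS7", "ARG5"])], [("frag", [1, 2, 3])], ["frag"])

def Spec_getFragToRes (ligToProDict : List (Int × List Int)) (ResToProDict : List (Int × List String)) (subStructureMatches : List (String × List Int)) (interactingLigands : List String) (out : List (String × List String)) : Prop := out = getFragToRes_alt ligToProDict ResToProDict subStructureMatches interactingLigands
instance (ligToProDict : List (Int × List Int)) (ResToProDict : List (Int × List String)) (subStructureMatches : List (String × List Int)) (interactingLigands : List String) (out : List (String × List String)) : Decidable (Spec_getFragToRes ligToProDict ResToProDict subStructureMatches interactingLigands out) := by unfold Spec_getFragToRes; infer_instance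

-- ===== CLAIM (what is proved, stated in full; the proofs are below) =====
def Claim_equal_getFragToRes : Prop := ∀ (ligToProDict : List (Int × List Int)) (ResToProDict : List (Int × List String)) (subStructureMatches : List (String × List Int)) (interactingLigands : List String), Dom_getFragToRes ligToProDict ResToProDict subStructureMatches interactingLigands → Pre_getFragToRes ligToProDict ResToProDict subStructureMatches interactingLigands → Spec_getFragToRes ligToProDict ResToProDict subStructureMatches interactingLigands (getFragToRes ligToProDict ResToProDict subStructureMatches interactingLigands)

-- ===== LEMMAS AND PROOFS =====

-- abbreviations for the shared loop bodies (definitionally equal to the ports' subterms)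
def pvResStep (resD : PySem.Dict Int (List String)) (s : PySem.Set String) (q : Int) : PySem.Set String :=
  if resD.contains q then PySem.Set.update s (resD.getD q []) else s
def pvFres (resD : PySem.Dict Int (List String)) (q : Int) : List String :=
  if resD.contains q then resD.getD q [] else []
def pvFlig (ligD : PySem.Dict Int (List Int)) (e : Int) : List Int :=
  if ligD.contains e then ligD.getD e [] else []
def pvG (resD : PySem.Dict Int (List String)) (l : List Int) : PySem.Set String :=
  l.foldl (pvResStep resD) PySem.Set.empty
def pvAtomToRes (ligD : PySem.Dict Int (List Int)) (resD : PySem.Dict Int (List String)) :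
    PySem.Dict Int (PySem.Set String) :=
  ligD.items.foldl (fun d p => d.insert p.1 (pvG resD p.2)) PySem.Dict.empty

-- a fold of set-updates is one update by the flattened list
theorem foldl_update_eq_update_flatMap {α β : Type} [BEq β] [LawfulBEq β] (f : α → List β)
    (L : List α) (acc : PySem.Set β) :
    L.foldl (fun a p => PySem.Set.update a (f p)) acc = PySem.Set.update acc (L.flatMap f) := by
  induction L generalizing acc with
  | nil => rfl
  | cons p L ih => simp only [List.foldl_cons, List.flatMap_cons, PySem.Set.update_append, ih]

theorem mem_foldl_update {α β : Type} [BEq β] [LawfulBEq β] (f : α → List β)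
    (L : List α) (acc : PySem.Set β) (x : β) (hx : x ∈ acc) :
    x ∈ L.foldl (fun a p => PySem.Set.update a (f p)) acc := by
  induction L generalizing acc with
  | nil => exact hx
  | cons p L ih => exact ih _ (by rw [PySem.Set.mem_update]; exact Or.inl hx)

theorem mem_f_foldl_update {α β : Type} [BEq β] [LawfulBEq β] (f : α → List β)
    (seen : List α) (acc : PySem.Set β) (p : α) (hp : p ∈ seen) (x : β) (hx : x ∈ f p) :
    x ∈ seen.foldl (fun a q => PySem.Set.update a (f q)) acc := by
  induction seen generalizing acc with
  | nil => cases hp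
  | cons q seen ih =>
    rcases List.mem_cons.mp hp with h | h
    · subst h
      exact mem_foldl_update f seen _ x (by rw [PySem.Set.mem_update]; exact Or.inr hx)
    · exact ih _ h

theorem update_eq_self_of_subset {β : Type} [BEq β] [LawfulBEq β] (s : PySem.Set β)
    (l : List β) (h : ∀ x ∈ l, x ∈ s) : PySem.Set.update s l = s := by
  induction l generalizing s with
  | nil => rfl
  | cons x l ih =>
    rw [PySem.Set.update_cons, PySem.Set.add_of_mem (h x (List.mem_cons_self))]
    exact ih s (fun y hy => h y (List.mem_cons_of_mem _ hy))

-- deduplication is invisible to a fold of set-updates: folding over a set built by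
-- Set.add from `seen` is folding over `seen` and then over the new elements of P
theorem foldl_update_foldl_add {α β : Type} [BEq α] [LawfulBEq α] [BEq β] [LawfulBEq β]
    (f : α → List β) (P seen : List α) (acc : PySem.Set β) :
    (P.foldl PySem.Set.add seen).foldl (fun a p => PySem.Set.update a (f p)) acc
      = P.foldl (fun a p => PySem.Set.update a (f p))
          (seen.foldl (fun a p => PySem.Set.update a (f p)) acc) := by
  induction P generalizing seen with
  | nil => rfl
  | cons p P ih =>
    simp only [List.foldl_cons]
    by_cases hp : p ∈ seen
    · rw [PySem.Set.add_of_mem hp, ih,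
        update_eq_self_of_subset _ _ (fun x hx => mem_f_foldl_update f seen acc p hp x hx)]
    · rw [PySem.Set.add_of_not_mem hp, ih, List.foldl_append, List.foldl_cons, List.foldl_nil]

theorem foldl_update_ofList {α β : Type} [BEq α] [LawfulBEq α] [BEq β] [LawfulBEq β]
    (f : α → List β) (P : List α) (acc : PySem.Set β) :
    (PySem.Set.ofList P).foldl (fun a p => PySem.Set.update a (f p)) acc
      = P.foldl (fun a p => PySem.Set.update a (f p)) acc := by
  rw [PySem.Set.ofList_eq_foldl, foldl_update_foldl_add]
  rfl

theorem update_ofList_right {β : Type} [BEq β] [LawfulBEq β] (s : PySem.Set β) (X : List β) :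
    PySem.Set.update s (PySem.Set.ofList X) = PySem.Set.update s X := by
  have h : ∀ (Y : List β) (acc : PySem.Set β), PySem.Set.update acc Y
      = Y.foldl (fun a q => PySem.Set.update a ([q] : List β)) acc := by
    intro Y acc
    exact PySem.List.foldl_congr_mem Y _ _ acc (fun a x _ => rfl)
  rw [h, h, foldl_update_ofList (fun q => ([q] : List β))]

-- the conditional union/update step is an unconditional update by a conditional list
theorem ite_union_eq_update {β : Type} [BEq β] [LawfulBEq β] (c : Bool) (s : PySem.Set β) (l : List β) :
    (if c then PySem.Set.update s l else s) = PySem.Set.update s (if c then l else []) := by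
  cases c <;> rfl

-- same statement through Set.union (A's s.union(…) method; union is definitionally update)
theorem ite_union_eq_update' {β : Type} [BEq β] [LawfulBEq β] (c : Bool) (s : PySem.Set β) (l : List β) :
    (if c then PySem.Set.union s l else s) = PySem.Set.update s (if c then l else []) :=
  ite_union_eq_update c s l

-- the residue-collecting fold, characterised as one update
theorem pvG_char (resD : PySem.Dict Int (List String)) (L : List Int) (acc : PySem.Set String) :
    L.foldl (pvResStep resD) acc = PySem.Set.update acc (L.flatMap (pvFres resD)) := by
  rw [PySem.List.foldl_congr_mem L (pvResStep resD)
      (fun a q => PySem.Set.update a (pvFres resD q)) acc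
      (fun a x _ => ite_union_eq_update (resD.contains x) a (resD.getD x [])),
    foldl_update_eq_update_flatMap]

-- A's per-fragment residue set is one update by the doubly-flattened list
theorem fragA_eq (ligD : PySem.Dict Int (List Int)) (resD : PySem.Dict Int (List String))
    (theSet : List Int) :
    (theSet.foldl (fun proSet ele =>
        if ligD.contains ele then PySem.Set.union proSet (ligD.getD ele []) else proSet)
        PySem.Set.empty).foldl (fun ResSet ele2 =>
        if resD.contains ele2 then PySem.Set.union ResSet (resD.getD ele2 []) else ResSet)
        PySem.Set.empty
      = PySem.Set.update PySem.Set.empty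
          ((theSet.flatMap (pvFlig ligD)).flatMap (pvFres resD)) := by
  have h1 : (theSet.foldl (fun proSet ele =>
      if ligD.contains ele then PySem.Set.union proSet (ligD.getD ele []) else proSet)
      PySem.Set.empty)
      = PySem.Set.ofList (theSet.flatMap (pvFlig ligD)) := by
    rw [PySem.List.foldl_congr_mem theSet
        (fun proSet ele => if ligD.contains ele then PySem.Set.union proSet (ligD.getD ele []) else proSet)
        (fun a e => PySem.Set.update a (pvFlig ligD e)) PySem.Set.empty
        (fun a x _ => ite_union_eq_update' (ligD.contains x) a (ligD.getD x [])),
      foldl_update_eq_update_flatMap]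
    rfl
  rw [h1]
  have h2 : ∀ (L : List Int),
      L.foldl (fun ResSet ele2 =>
        if resD.contains ele2 then PySem.Set.union ResSet (resD.getD ele2 []) else ResSet)
        PySem.Set.empty
      = L.foldl (pvResStep resD) PySem.Set.empty :=
    fun L => PySem.List.foldl_congr_mem L _ (pvResStep resD) _ (fun a x _ => rfl)
  rw [h2]
  show (PySem.Set.ofList _).foldl (pvResStep resD) PySem.Set.empty = _
  unfold pvResStep
  rw [PySem.List.foldl_congr_mem _
      (fun s q => if resD.contains q then PySem.Set.update s (resD.getD q []) else s)
      (fun a q => PySem.Set.update a (pvFres resD q)) PySem.Set.empty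
      (fun a x _ => ite_union_eq_update (resD.contains x) a (resD.getD x [])),
    foldl_update_ofList, foldl_update_eq_update_flatMap]

-- the atomToRes index has the same keys as ligD and pvG-values
theorem atomToRes_items (ligD : PySem.Dict Int (List Int)) (resD : PySem.Dict Int (List String))
    (hnd : ligD.keys.Nodup) :
    (pvAtomToRes ligD resD).items = ligD.items.map (fun p => (p.1, pvG resD p.2)) := by
  unfold pvAtomToRes
  rw [PySem.Dict.items_foldl_insert_fresh ligD.items (fun p => p.1) (fun p => pvG resD p.2)
    PySem.Dict.empty (fun a _ => PySem.Dict.contains_empty _) hnd]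
  rfl

theorem atomToRes_keys_nodup (ligD : PySem.Dict Int (List Int)) (resD : PySem.Dict Int (List String)) :
    (pvAtomToRes ligD resD).keys.Nodup :=
  PySem.Dict.nodup_keys_foldl_insert_key _ _ _ _ PySem.Dict.nodup_keys_empty

theorem atomToRes_contains (ligD : PySem.Dict Int (List Int)) (resD : PySem.Dict Int (List String))
    (hnd : ligD.keys.Nodup) (a : Int) :
    (pvAtomToRes ligD resD).contains a = ligD.contains a := by
  rw [PySem.Dict.contains_eq_decide_mem_keys, PySem.Dict.contains_eq_decide_mem_keys]
  have hk : (pvAtomToRes ligD resD).keys = ligD.keys := by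
    show (pvAtomToRes ligD resD).items.map (·.1) = ligD.items.map (·.1)
    rw [atomToRes_items ligD resD hnd, List.map_map]
    rfl
  rw [hk]

theorem atomToRes_getD (ligD : PySem.Dict Int (List Int)) (resD : PySem.Dict Int (List String))
    (hnd : ligD.keys.Nodup) (a : Int) (ha : ligD.contains a = true) :
    (pvAtomToRes ligD resD).getD a [] = pvG resD (ligD.getD a []) := by
  obtain ⟨v, hv⟩ := Option.isSome_iff_exists.mp
    (by rw [← PySem.Dict.contains_eq_isSome_get? ligD a, ha])
  have hmem : (a, pvG resD v) ∈ (pvAtomToRes ligD resD).items := by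
    rw [atomToRes_items ligD resD hnd]
    exact List.mem_map.mpr ⟨(a, v), PySem.Dict.mem_items_of_get?_eq_some ligD hv, rfl⟩
  rw [PySem.Dict.getD_of_mem_items _ hmem (atomToRes_keys_nodup ligD resD),
    PySem.Dict.getD_of_get?_eq_some ligD [] hv]

-- B's per-fragment residue set is the same doubly-flattened update
theorem fragB_eq (ligD : PySem.Dict Int (List Int)) (resD : PySem.Dict Int (List String))
    (hnd : ligD.keys.Nodup) (theSet : List Int) :
    (theSet.foldl (fun s atom =>
        if (pvAtomToRes ligD resD).contains atom
        then PySem.Set.update s ((pvAtomToRes ligD resD).getD atom []) else s) PySem.Set.empty)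
      = PySem.Set.update PySem.Set.empty
          ((theSet.flatMap (pvFlig ligD)).flatMap (pvFres resD)) := by
  have hstep : ∀ (s : PySem.Set String) (atom : Int),
      (if (pvAtomToRes ligD resD).contains atom
       then PySem.Set.update s ((pvAtomToRes ligD resD).getD atom []) else s)
        = PySem.Set.update s ((pvFlig ligD atom).flatMap (pvFres resD)) := by
    intro s atom
    by_cases h : ligD.contains atom = true
    · rw [atomToRes_contains ligD resD hnd, h, if_pos rfl,
        atomToRes_getD ligD resD hnd atom h]
      unfold pvG
      rw [pvG_char]
      show PySem.Set.update s (PySem.Set.ofList _) = _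
      rw [update_ofList_right]
      unfold pvFlig
      rw [if_pos h]
    · have h' : ligD.contains atom = false := by
        cases hc : ligD.contains atom
        · rfl
        · exact absurd hc h
      rw [atomToRes_contains ligD resD hnd, h']
      simp only [Bool.false_eq_true, if_false]
      unfold pvFlig
      rw [if_neg (by simp [h'])]
      rfl
  rw [PySem.List.foldl_congr_mem theSet _
      (fun a atom => PySem.Set.update a ((pvFlig ligD atom).flatMap (pvFres resD)))
      PySem.Set.empty (fun a x _ => hstep a x),
    foldl_update_eq_update_flatMap, ← List.flatMap_assoc]

-- ===== VERDICT (by name: the statement is the Claim_ definition above) =====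
theorem getFragToRes_spec : Claim_equal_getFragToRes := by
  intro lig res subs inter _ _
  show getFragToRes lig res subs inter = getFragToRes_alt lig res subs inter
  unfold getFragToRes getFragToRes_alt
  refine congrArg PySem.Dict.items ?_
  refine PySem.List.foldl_congr_mem inter _ _ _ (fun d frag _ => ?_)
  refine congrArg (d.insert frag) ?_
  exact (fragA_eq (PySem.Dict.ofList lig) (PySem.Dict.ofList res)
      ((PySem.Dict.ofList subs).getD frag [])).trans
    (fragB_eq (PySem.Dict.ofList lig) (PySem.Dict.ofList res)
      (PySem.Dict.nodup_keys_ofList lig) ((PySem.Dict.ofList subs).getD frag [])).symm
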